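-- pv_equiv track=rewrite | github.com/kittilsenstian-debug/the-hand | theory-tools/theta4_monster_fingerprint.py | compute_theta3_stable
-- ===== SOURCE A (Python) =====
-- def compute_theta3_stable(q, p):
--     """Same convergence analysis for θ₃."""
--     if p == 2:
--         return 1 % 2, 0, True
--
--     period = 2 * (p - 1)
--
--     period_sum = 0
--     for n in range(1, period + 1):
--         exp = (n * n) % (p - 1)
--         qn2 = pow(q, exp, p)
--         period_sum = (period_sum + qn2) % p
--
--     val_1period = (1 + 2 * period_sum) % p
--
--     period2_sum = 0
--     for n in range(period + 1, 2 * period + 1):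
--         exp = (n * n) % (p - 1)
--         qn2 = pow(q, exp, p)
--         period2_sum = (period2_sum + qn2) % p
--
--     periods_agree = (period_sum % p == period2_sum % p)
--
--     return val_1period, period_sum % p, periods_agree
-- ===== SOURCE B (Python) =====
-- def compute_theta3_stable(q, p):
--     """Same convergence analysis for theta3 -- one power table, one half-period pass.
--
--     q^(n^2 mod (p-1)) is periodic in n with period p-1, so one sum over
--     n = 1..p-1 determines both of A's loops: the full-period sum is twice it,
--     and the second period always agrees with the first.
--     """
--     if p == 2:
--         return 1 % 2, 0, True
--     m = p - 1
--     s = 0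
--     if m > 0:
--         powtab = []
--         cur = 1 % p
--         for _ in range(m):
--             powtab.append(cur)
--             cur = cur * q % p
--         for n in range(1, m + 1):
--             s = (s + powtab[n * n % m]) % p
--         s = 2 * s % p
--     return (1 + 2 * s) % p, s, True
-- ===== Notes on version B (the rewrite author's own statement) =====
-- stated objective: faster
-- what changed: B exploits that q^(n^2 mod (p-1)) is periodic in n with period p-1: it builds the power table q^e mod p by p-1 successive multiplications instead of 4(p-1) modular exponentiations, sums one half-period and doubles it, and returns periods_agree = True without a second loop.
import Mathlib
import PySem

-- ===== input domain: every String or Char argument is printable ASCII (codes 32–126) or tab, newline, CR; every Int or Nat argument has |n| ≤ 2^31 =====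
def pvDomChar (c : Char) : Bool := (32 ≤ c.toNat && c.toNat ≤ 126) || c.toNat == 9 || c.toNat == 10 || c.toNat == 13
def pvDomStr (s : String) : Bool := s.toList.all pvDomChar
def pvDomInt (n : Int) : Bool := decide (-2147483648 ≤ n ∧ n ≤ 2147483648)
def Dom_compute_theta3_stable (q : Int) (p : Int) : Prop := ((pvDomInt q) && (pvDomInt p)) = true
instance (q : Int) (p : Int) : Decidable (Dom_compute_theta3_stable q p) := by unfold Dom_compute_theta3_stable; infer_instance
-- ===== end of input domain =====

-- B replaces A's four period-long loops of modular exponentiations by one iterated-multiplication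
-- power table plus one half-period sum (doubled), and returns periods_agree = True directly; faster.

-- ===== PORT A =====
def compute_theta3_stable (q : Int) (p : Int) : Int × Int × Bool :=
  if p = 2 then (PySem.Int.mod 1 2, 0, true)
  else
    let period := 2 * (p - 1)
    let period_sum := (PySem.List.pyRange 1 (period + 1) 1).foldl
      (fun acc n => PySem.Int.mod (acc + PySem.Int.powMod q (PySem.Int.mod (n * n) (p - 1)).toNat p) p) 0
    let val_1period := PySem.Int.mod (1 + 2 * period_sum) p
    let period2_sum := (PySem.List.pyRange (period + 1) (2 * period + 1) 1).foldl
      (fun acc n => PySem.Int.mod (acc + PySem.Int.powMod q (PySem.Int.mod (n * n) (p - 1)).toNat p) p) 0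
    (val_1period, PySem.Int.mod period_sum p,
      PySem.Int.mod period_sum p == PySem.Int.mod period2_sum p)

-- ===== PORT B =====
def compute_theta3_stable_alt (q : Int) (p : Int) : Int × Int × Bool :=
  if p = 2 then (PySem.Int.mod 1 2, 0, true)
  else
    let m := p - 1
    let s : Int :=
      if 0 < m then
        let tab := ((List.range m.toNat).foldl
          (fun (st : List Int × Int) _ => (st.1 ++ [st.2], PySem.Int.mod (st.2 * q) p))
          ([], PySem.Int.mod 1 p)).1
        let s0 := (PySem.List.pyRange 1 (m + 1) 1).foldl
          (fun acc n => PySem.Int.mod (acc + PySem.List.pyGetD tab (PySem.Int.mod (n * n) m) 0) p) 0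
        PySem.Int.mod (2 * s0) p
      else 0
    (PySem.Int.mod (1 + 2 * s) p, s, true)

-- ===== PRECONDITION & SPEC =====
-- A raises ZeroDivisionError only at p = 0 (val_1period = (1 + 0) % 0); everywhere else it returns.
def Pre_compute_theta3_stable (q : Int) (p : Int) : Prop := p ≠ 0
instance (q : Int) (p : Int) : Decidable (Pre_compute_theta3_stable q p) := by unfold Pre_compute_theta3_stable; infer_instance
def pvWitness_compute_theta3_stable : Int × Int := (3, 7)

def Spec_compute_theta3_stable (q : Int) (p : Int) (out : Int × Int × Bool) : Prop := out = compute_theta3_stable_alt q p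
instance (q : Int) (p : Int) (out : Int × Int × Bool) : Decidable (Spec_compute_theta3_stable q p out) := by unfold Spec_compute_theta3_stable; infer_instance

-- ===== CLAIM (what is proved, stated in full; the proofs are below) =====
def Claim_equal_compute_theta3_stable : Prop := ∀ (q : Int) (p : Int), Dom_compute_theta3_stable q p → Pre_compute_theta3_stable q p → Spec_compute_theta3_stable q p (compute_theta3_stable q p)

-- ===== LEMMAS AND PROOFS =====

-- a fold accumulating (acc + g n) % p equals the sum taken mod p
theorem pvFoldSum (g : Int → Int) (p : Int) (hp : 0 < p) :
    ∀ (l : List Int) (acc : Int),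
      l.foldl (fun a n => PySem.Int.mod (a + g n) p) (PySem.Int.mod acc p)
        = PySem.Int.mod (acc + (l.map g).sum) p := by
  intro l
  induction l with
  | nil => intro acc; simp
  | cons x t ih =>
      intro acc
      simp only [List.foldl_cons, List.map_cons, List.sum_cons]
      rw [show PySem.Int.mod (PySem.Int.mod acc p + g x) p = PySem.Int.mod (acc + g x) p by
        simp [PySem.Int.mod_eq_emod_of_pos hp, Int.emod_add_emod]]
      rw [ih (acc + g x)]
      rw [add_assoc]

-- (x + m)² ≡ x² (mod m)
theorem pvShiftSq (x m : Int) (hm : 0 < m) :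
    PySem.Int.mod ((x + m) * (x + m)) m = PySem.Int.mod (x * x) m := by
  simp only [PySem.Int.mod_eq_emod_of_pos hm]
  have h : (x + m) * (x + m) = x * x + (2 * x + m) * m := by ring
  rw [h, Int.add_mul_emod_self_right]

-- mapping over a shifted range = mapping the shifted function
theorem pvMapShift (F : Int → Int) (a b m : Int) :
    (PySem.List.pyRange (a + m) (b + m)).map F
      = (PySem.List.pyRange a b).map (fun n => F (n + m)) := by
  rw [PySem.List.pyRange_one, PySem.List.pyRange_one]
  have h : b + m - (a + m) = b - a := by ring
  rw [h, List.map_map, List.map_map]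
  apply List.map_congr_left
  intro k _
  simp only [Function.comp_apply]
  ring_nf

theorem pvPowStep (q p : Int) (hp : 0 < p) (j : Nat) :
    PySem.Int.mod (PySem.Int.mod (q ^ j) p * q) p = PySem.Int.mod (q ^ (j + 1)) p := by
  simp only [PySem.Int.mod_eq_emod_of_pos hp, pow_succ]
  conv_rhs => rw [Int.mul_emod]
  rw [Int.mul_emod, Int.emod_emod_of_dvd _ dvd_rfl]

-- B's table loop builds [q^0 % p, q^1 % p, …]
theorem pvTab (q p : Int) (hp : 0 < p) :
    ∀ (k : Nat) (acc : List Int) (j : Nat),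
      (List.range k).foldl
          (fun (st : List Int × Int) _ => (st.1 ++ [st.2], PySem.Int.mod (st.2 * q) p))
          (acc, PySem.Int.mod (q ^ j) p)
        = (acc ++ (List.range k).map (fun i => PySem.Int.mod (q ^ (j + i)) p),
           PySem.Int.mod (q ^ (j + k)) p) := by
  intro k
  induction k with
  | zero => intro acc j; simp
  | succ k ih =>
      intro acc j
      rw [List.range_succ, List.foldl_append, ih]
      simp only [List.foldl_cons, List.foldl_nil, List.map_append, List.map_cons, List.map_nil,
        List.append_assoc]
      rw [pvPowStep q p hp (j + k), show j + k + 1 = j + (k + 1) by omega]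

theorem pvModZero (p : Int) : PySem.Int.mod 0 p = 0 := by
  simp [PySem.Int.mod]

theorem pvFoldSum0 (g : Int → Int) (p : Int) (hp : 0 < p) (l : List Int) :
    l.foldl (fun a n => PySem.Int.mod (a + g n) p) 0
      = PySem.Int.mod ((l.map g).sum) p := by
  have h := pvFoldSum g p hp l 0
  rw [pvModZero] at h
  simpa using h

theorem pvLookup (g : Nat → Int) (M : Nat) (e : Int) (h0 : 0 ≤ e) (hM : e < (M : Int)) :
    PySem.List.pyGetD ((List.range M).map g) e 0 = g e.toNat := by
  rw [PySem.List.pyGetD_of_nonneg _ _ h0]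
  have h : e.toNat < M := by omega
  simp [List.getD, h]

theorem pvTwoMul (S p : Int) (hp : 0 < p) :
    PySem.Int.mod (2 * PySem.Int.mod S p) p = PySem.Int.mod (2 * S) p := by
  simp only [PySem.Int.mod_eq_emod_of_pos hp]
  conv_rhs => rw [Int.mul_emod]
  rw [Int.mul_emod, Int.emod_emod_of_dvd _ dvd_rfl]

theorem pvModMod (S p : Int) (hp : 0 < p) :
    PySem.Int.mod (PySem.Int.mod S p) p = PySem.Int.mod S p := by
  simp only [PySem.Int.mod_eq_emod_of_pos hp]
  exact Int.emod_emod_of_dvd _ dvd_rfl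

-- main case p ≥ 3
theorem pvMain (q p : Int) (hp2 : p ≠ 2) (hp1 : 1 < p) :
    compute_theta3_stable q p = compute_theta3_stable_alt q p := by
  have hp : 0 < p := by omega
  have hm : (0:Int) < p - 1 := by omega
  set m : Int := p - 1 with hmdef
  set f : Int → Int := fun n => PySem.Int.mod (q ^ (PySem.Int.mod (n * n) m).toNat) p with hf
  set S : Int := ((PySem.List.pyRange 1 (m+1)).map f).sum with hS
  have hshift : ∀ a b : Int, (PySem.List.pyRange (a+m) (b+m)).map f = (PySem.List.pyRange a b).map f := by
    intro a b
    rw [pvMapShift f a b m]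
    apply List.map_congr_left
    intro n _
    simp only [hf]
    rw [pvShiftSq n m (by omega)]
  have hsplit : ((PySem.List.pyRange 1 (2*m+1)).map f).sum = S + S := by
    rw [PySem.List.pyRange_one_append 1 (m+1) (2*m+1) (by omega) (by omega), List.map_append,
      List.sum_append]
    have h : PySem.List.pyRange (m+1) (2*m+1) = PySem.List.pyRange (1+m) ((m+1)+m) := by
      congr 1 <;> ring
    rw [h, hshift 1 (m+1), hS]
  have hloop1 : (PySem.List.pyRange 1 (2*m+1)).foldl (fun a n => PySem.Int.mod (a + f n) p) 0
      = PySem.Int.mod (2*S) p := by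
    rw [pvFoldSum0 f p hp, hsplit, two_mul]
  have hloop2 : (PySem.List.pyRange (2*m+1) (2*(2*m)+1)).foldl (fun a n => PySem.Int.mod (a + f n) p) 0
      = PySem.Int.mod (2*S) p := by
    rw [pvFoldSum0 f p hp]
    have e1 : PySem.List.pyRange (2*m+1) (2*(2*m)+1) = PySem.List.pyRange ((m+1)+m) ((3*m+1)+m) := by
      congr 1 <;> ring
    have e2 : PySem.List.pyRange (m+1) (3*m+1) = PySem.List.pyRange (1+m) ((2*m+1)+m) := by
      congr 1 <;> ring
    rw [e1, hshift (m+1) (3*m+1), e2, hshift 1 (2*m+1), hsplit, two_mul]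
  have htab : ((List.range m.toNat).foldl
      (fun (st : List Int × Int) _ => (st.1 ++ [st.2], PySem.Int.mod (st.2 * q) p))
      ([], PySem.Int.mod 1 p)).1
      = (List.range m.toNat).map (fun i => PySem.Int.mod (q ^ i) p) := by
    rw [show PySem.Int.mod 1 p = PySem.Int.mod (q ^ 0) p by rw [pow_zero]]
    rw [pvTab q p hp m.toNat [] 0]
    simp
  have hmt : ((m.toNat : Int)) = m := Int.toNat_of_nonneg (by omega)
  have hlk : ∀ n : Int,
      PySem.List.pyGetD ((List.range m.toNat).map (fun i => PySem.Int.mod (q ^ i) p))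
        (PySem.Int.mod (n * n) m) 0 = f n := by
    intro n
    rw [pvLookup (fun i => PySem.Int.mod (q ^ i) p) m.toNat (PySem.Int.mod (n * n) m)
      (PySem.Int.mod_nonneg _ hm) (by rw [hmt]; exact PySem.Int.mod_lt _ hm)]
  have hloopB : (PySem.List.pyRange 1 (m+1)).foldl
      (fun acc n => PySem.Int.mod (acc + PySem.List.pyGetD
        ((List.range m.toNat).map (fun i => PySem.Int.mod (q ^ i) p))
        (PySem.Int.mod (n * n) m) 0) p) 0 = PySem.Int.mod S p := by
    have h : (fun (acc : Int) (n : Int) => PySem.Int.mod (acc + PySem.List.pyGetD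
        ((List.range m.toNat).map (fun i => PySem.Int.mod (q ^ i) p))
        (PySem.Int.mod (n * n) m) 0) p) = (fun a n => PySem.Int.mod (a + f n) p) := by
      funext acc n; rw [hlk n]
    rw [h, pvFoldSum0 f p hp]
  simp only [compute_theta3_stable, compute_theta3_stable_alt, PySem.Int.powMod,
    if_neg hp2, ← hmdef, if_pos hm]
  rw [htab, hloop1, hloop2, hloopB, pvTwoMul S p hp, pvModMod (2*S) p hp, beq_self_eq_true]

-- degenerate case p ≤ 1, p ≠ 0: all loops are empty on both sides
theorem pvEdge (q p : Int) (hp1 : p ≤ 1) :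
    compute_theta3_stable q p = compute_theta3_stable_alt q p := by
  have r1 : PySem.List.pyRange 1 (2*(p-1)+1) = [] := PySem.List.pyRange_one_eq_nil (by omega)
  have r2 : PySem.List.pyRange (2*(p-1)+1) (2*(2*(p-1))+1) = [] := PySem.List.pyRange_one_eq_nil (by omega)
  simp [compute_theta3_stable, compute_theta3_stable_alt,
    show p ≠ 2 by omega, show ¬ (1:Int) < p by omega, r1, r2, pvModZero]

theorem pvAll (q p : Int) (hp0 : p ≠ 0) :
    compute_theta3_stable q p = compute_theta3_stable_alt q p := by
  by_cases h2 : p = 2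
  · subst h2; rfl
  · by_cases h1 : 1 < p
    · exact pvMain q p h2 h1
    · exact pvEdge q p (by omega)

-- ===== VERDICT (by name: the statement is the Claim_ definition above) =====
theorem compute_theta3_stable_spec : Claim_equal_compute_theta3_stable := by
  intro q p _ hpre
  exact pvAll q p hpre
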